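-- pv_equiv track=rewrite | github.com/ArtemEfimov/Checkio | escher/The_Stone_Wall.py | stone_wall
-- ===== SOURCE A (Python) =====
-- def stone_wall(wall):
--     """ Description """
--
--     wall = [x for x in wall.split('\n') if len(x) > 0]  # ['##########', '####0##0##', '00##0###00']
--     rot_wall = ['' for _ in range(len(wall[0]))]  # ['', '', '', '', '', '', '', '', '', '']
--     for i in range(len(wall)):
--         for j in range(len(wall[0])):
--             rot_wall[j] += wall[i][j]  # ['##0', '##0', '###', '###', '#00', '###', '###', '#0#', '##0', '##0']
--
--     def conv(val: str):
--         """Count values"""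
--         return val.count('#')
--
--     new_list = list(map(conv, rot_wall))
--     return new_list.index(min(new_list))
-- ===== SOURCE B (Python) =====
-- def stone_wall(wall):
--     # width of the first non-empty line, found by a raw cursor scan
--     i = 0
--     while i < len(wall) and wall[i] == '\n':
--         i += 1
--     w = 0
--     while i + w < len(wall) and wall[i + w] != '\n':
--         w += 1
--     # one pass over the raw text with a column cursor; no row list, no transposition
--     counts = [0] * w
--     col = 0
--     for ch in wall:
--         if ch == '\n':
--             col = 0
--         else:
--             if col < w and ch == '#':
--                 counts[col] += 1
--             col += 1
--     # first-minimum argmin built back-to-front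
--     best = w - 1
--     for j in reversed(range(w - 1)):
--         if counts[j] <= counts[best]:
--             best = j
--     return best
-- ===== Notes on version B (the rewrite author's own statement) =====
-- stated objective: alternative
-- what changed: B never splits the wall into rows or transposes it: it finds the first non-empty line's width with a raw cursor scan, then makes one pass over the whole character stream maintaining a column cursor that resets at newlines and increments a counts cell per '#', and finally computes the first-minimum column by a right-to-left scan with a <=-update instead of index(min(...)).
import Mathlib
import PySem

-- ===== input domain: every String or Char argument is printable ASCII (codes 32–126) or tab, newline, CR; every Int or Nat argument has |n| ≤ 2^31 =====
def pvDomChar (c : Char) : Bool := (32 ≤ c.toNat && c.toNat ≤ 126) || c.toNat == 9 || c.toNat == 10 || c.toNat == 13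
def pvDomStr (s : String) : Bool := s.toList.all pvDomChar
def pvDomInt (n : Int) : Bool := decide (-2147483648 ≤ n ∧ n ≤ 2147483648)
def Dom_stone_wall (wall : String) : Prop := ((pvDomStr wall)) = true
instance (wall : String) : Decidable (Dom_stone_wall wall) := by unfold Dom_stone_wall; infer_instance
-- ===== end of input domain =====

-- B never splits the wall into rows or transposes it: one raw scan finds the first
-- non-empty line's width, one pass over the character stream with a column cursor fills the
-- counts, and a right-to-left scan with a <=-update builds the first-minimum column index.

-- ===== PORT A =====
def stone_wall (wall : String) : Int :=
  -- wall = [x for x in wall.split('\n') if len(x) > 0]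
  let lines := (PySem.Chars.splitOn wall.toList ['\n']).filter (fun x => decide (0 < x.length))
  -- len(wall[0])  (wall[0] raises IndexError on empty 'lines' — excluded by Pre_)
  let w : Nat := (PySem.List.pyGetD lines 0 []).length
  -- rot_wall = ['' for _ in range(len(wall[0]))]
  let rot0 : List (List Char) := List.replicate w []
  -- for i in range(len(wall)): for j in range(len(wall[0])): rot_wall[j] += wall[i][j]
  let rot :=
    (PySem.List.pyRange 0 (lines.length : Int) 1).foldl
      (fun rot i =>
        (PySem.List.pyRange 0 (w : Int) 1).foldl
          (fun rot j =>
            PySem.List.pySetD rot j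
              (PySem.List.pyGetD rot j [] ++ [PySem.List.pyGetD (PySem.List.pyGetD lines i []) j ' ']))
          rot)
      rot0
  -- new_list = list(map(conv, rot_wall)) with conv = val.count('#')
  let new_list : List Int := rot.map (fun s => (PySem.Chars.count s ['#'] : Int))
  -- return new_list.index(min(new_list))
  (((PySem.List.index? new_list ((PySem.List.min? new_list (fun y => y)).getD 0)).getD 0 : Nat) : Int)

-- ===== PORT B =====
-- while i < len(wall) and wall[i] == '\n': i += 1   (cursor past the leading newlines)
def altSkipNl : List Char → List Char
  | [] => []
  | c :: t => if c = '\n' then altSkipNl t else c :: t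

-- w = 0; while i + w < len(wall) and wall[i + w] != '\n': w += 1
def altWidth : List Char → Nat
  | [] => 0
  | c :: t => if c = '\n' then 0 else altWidth t + 1

-- loop body of 'for ch in wall', state (counts, col)
def altStep (w : Nat) (st : List Int × Nat) (ch : Char) : List Int × Nat :=
  if ch = '\n' then (st.1, 0)
  else if st.2 < w ∧ ch = '#' then (st.1.set st.2 (st.1.getD st.2 0 + 1), st.2 + 1)
  else (st.1, st.2 + 1)

def stone_wall_alt (wall : String) : Int :=
  let cs := wall.toList
  -- the two cursor scans for the width of the first non-empty line
  let w : Nat := altWidth (altSkipNl cs)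
  -- counts = [0]*w; col = 0; for ch in wall: …
  let counts : List Int := (cs.foldl (altStep w) (List.replicate w 0, 0)).1
  -- best = w - 1; for j in reversed(range(w - 1)): if counts[j] <= counts[best]: best = j
  (PySem.List.pyRange 0 ((w : Int) - 1) 1).reverse.foldl
    (fun best j =>
      if PySem.List.pyGetD counts j 0 ≤ PySem.List.pyGetD counts best 0 then j else best)
    ((w : Int) - 1)

-- ===== PRECONDITION & SPEC =====
-- Pre_ excludes exactly the inputs where the Python A raises IndexError: no nonempty line at
-- all (wall[0]), or some line strictly shorter than the first one (wall[i][j]).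
def Pre_stone_wall (wall : String) : Prop :=
  let rows := (PySem.Chars.splitOn wall.toList ['\n']).filter (fun x => decide (0 < x.length))
  rows ≠ [] ∧ ∀ r ∈ rows, (rows.headD []).length ≤ r.length
instance (wall : String) : Decidable (Pre_stone_wall wall) := by unfold Pre_stone_wall; infer_instance

def pvWitness_stone_wall : String := "#0#\n##0"

def Spec_stone_wall (wall : String) (out : Int) : Prop := out = stone_wall_alt wall
instance (wall : String) (out : Int) : Decidable (Spec_stone_wall wall out) := by unfold Spec_stone_wall; infer_instance

-- ===== CLAIM (what is proved, stated in full; the proofs are below) =====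
def Claim_equal_stone_wall : Prop := ∀ (wall : String), Dom_stone_wall wall → Pre_stone_wall wall → Spec_stone_wall wall (stone_wall wall)

-- ===== LEMMAS AND PROOFS =====

-- ---------- shared: first argmin (A's index(min(...))) ----------
def famK (key : Nat → Int) : Nat → Nat
  | 0 => 0
  | n + 1 => if n = 0 then 0 else if key n < key (famK key n) then n else famK key n

lemma famK_spec (key : Nat → Int) : ∀ n, 0 < n →
    famK key n < n ∧ (∀ j < n, key (famK key n) ≤ key j) ∧ (∀ j < famK key n, key (famK key n) < key j) := by
  intro n
  induction n with
  | zero => omega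
  | succ n ih =>
    intro _
    by_cases hn : n = 0
    · subst hn
      refine ⟨by simp [famK], ?_, ?_⟩
      · intro j hj
        interval_cases j
        simp [famK]
      · intro j hj
        simp [famK] at hj
    · obtain ⟨h1, h2, h3⟩ := ih (Nat.pos_of_ne_zero hn)
      simp only [famK, if_neg hn]
      by_cases hlt : key n < key (famK key n)
      · simp only [if_pos hlt]
        refine ⟨by omega, ?_, ?_⟩
        · intro j hj
          rcases Nat.lt_succ_iff_lt_or_eq.mp hj with h | h
          · exact le_of_lt (lt_of_lt_of_le hlt (h2 j h))
          · simp [h]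
        · intro j hj
          exact lt_of_lt_of_le hlt (h2 j hj)
      · simp only [if_neg hlt]
        refine ⟨by omega, ?_, h3⟩
        intro j hj
        rcases Nat.lt_succ_iff_lt_or_eq.mp hj with h | h
        · exact h2 j h
        · subst h; omega

lemma min?_append_singleton {α : Type} (key : α → Int) (l : List α) (x : α) :
    PySem.List.min? (l ++ [x]) key
    = (match PySem.List.min? l key with
       | none => some x
       | some m => if key x < key m then some x else some m) := by
  simp only [PySem.List.min?, List.foldl_append, List.foldl_cons, List.foldl_nil]
  rfl

lemma min?_range (key : Nat → Int) (n : Nat) :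
    PySem.List.min? (List.range n) key = if n = 0 then none else some (famK key n) := by
  induction n with
  | zero => simp [PySem.List.min?]
  | succ n ih =>
    rw [List.range_succ, min?_append_singleton, ih]
    by_cases hn : n = 0
    · subst hn; simp [famK]
    · simp only [famK, if_neg hn]
      split_ifs <;> simp_all

lemma min?_map {α β : Type} (g : α → β) (key : β → Int) (l : List α) :
    PySem.List.min? (l.map g) key = (PySem.List.min? l (fun a => key (g a))).map g := by
  simp only [PySem.List.min?]
  suffices h : ∀ acc : Option α,
      List.foldl (fun acc x => match acc with | none => some x | some m => if key x < key m then some x else some m) (acc.map g) (l.map g)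
      = (List.foldl (fun acc x => match acc with | none => some x | some m => if key (g x) < key (g m) then some x else some m) acc l).map g by
    exact h none
  induction l with
  | nil => intro acc; simp
  | cons x t ih =>
    intro acc
    simp only [List.map_cons, List.foldl_cons]
    cases acc with
    | none => exact ih (some x)
    | some m =>
      simp only [Option.map_some]
      split_ifs <;> [exact ih (some x); exact ih (some m)]

lemma set_map_range {α : Type} (g : Nat → α) (w n : Nat) (v : α) :
    ((List.range w).map g).set n v = (List.range w).map (fun j => if j = n then v else g j) := by
  apply List.ext_getElem
  · simp
  · intro i h1 h2
    simp only [List.getElem_set, List.getElem_map, List.getElem_range]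
    by_cases h : i = n
    · simp [h]
    · simp [h]
      omega

lemma index_min_eq_famK (key : Nat → Int) (n : Nat) (hn : 0 < n) :
    (PySem.List.index? ((List.range n).map key)
      ((PySem.List.min? ((List.range n).map key) (fun y => y)).getD 0)).getD 0 = famK key n := by
  obtain ⟨h1, h2, h3⟩ := famK_spec key n hn
  set f := famK key n with hf
  have hys : PySem.List.min? ((List.range n).map key) (fun y => y) = some (key f) := by
    rw [min?_map, min?_range, if_neg (Nat.pos_iff_ne_zero.mp hn)]
    rfl
  rw [hys, Option.getD_some]
  have hlen : ((List.range n).map key).length = n := by simp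
  have hfl : f < ((List.range n).map key).length := by omega
  have hgf : ((List.range n).map key)[f] = key f := by simp
  have : PySem.List.index? ((List.range n).map key) (key f) = some f := by
    rw [PySem.List.index?_eq_some_iff]
    refine ⟨((List.range n).map key).take f, ((List.range n).map key).drop (f + 1), ?_, ?_, ?_⟩
    · rw [← hgf]
      rw [List.getElem_cons_drop, List.take_append_drop]
    · rw [List.length_take]
      omega
    · intro hmem
      have := List.mem_iff_getElem.mp hmem
      obtain ⟨j, hj, hje⟩ := this
      rw [List.length_take] at hj
      have hjf : j < f := by omega
      have : (((List.range n).map key).take f)[j] = key j := by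
        rw [List.getElem_take]
        simp
      rw [this] at hje
      exact absurd hje.symm (ne_of_lt (h3 j hjf))
  rw [this, Option.getD_some]

-- ---------- A's nested transposition loops ----------
lemma inner_loop (w : Nat) (f : Nat → List Char) (r : List Char) :
    (PySem.List.pyRange 0 (w : Int) 1).foldl
      (fun rot j => PySem.List.pySetD rot j
        (PySem.List.pyGetD rot j [] ++ [PySem.List.pyGetD r j ' '])) ((List.range w).map f)
    = (List.range w).map (fun j => f j ++ [r.getD j ' ']) := by
  rw [PySem.List.pyRange_zero_natCast]
  have main : ∀ n, n ≤ w →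
      ((List.range n).map (fun (k : Nat) => (k : Int))).foldl
        (fun rot j => PySem.List.pySetD rot j
          (PySem.List.pyGetD rot j [] ++ [PySem.List.pyGetD r j ' '])) ((List.range w).map f)
      = (List.range w).map (fun j => if j < n then f j ++ [r.getD j ' '] else f j) := by
    intro n
    induction n with
    | zero => simp
    | succ n ih =>
      intro hn
      rw [List.range_succ, List.map_append, List.foldl_append, List.map_singleton,
        List.foldl_cons, List.foldl_nil, ih (by omega)]
      set g : Nat → List Char := fun j => if j < n then f j ++ [r.getD j ' '] else f j with hg
      have hlen : ((List.range w).map g).length = w := by simp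
      have hget : PySem.List.pyGetD ((List.range w).map g) (n : Int) [] = g n := by
        rw [PySem.List.pyGetD_natCast, List.getD_eq_getElem _ _ (by omega : n < ((List.range w).map g).length)]
        simp
      rw [PySem.List.pySetD_natCast, hget, PySem.List.pyGetD_natCast, set_map_range]
      apply List.map_congr_left
      intro j hj
      have hjw : j < w := List.mem_range.mp hj
      by_cases hjn : j = n
      · subst hjn
        simp [hg, List.getD]
      · have : (j < n + 1) = (j < n) := by
          simp only [eq_iff_iff]
          omega
        simp [hjn, this, hg, List.getD_eq_getElem?_getD]
  rw [main w le_rfl]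
  apply List.map_congr_left
  intro j hj
  simp [List.mem_range.mp hj]

lemma outer_loop (w : Nat) (rows : List (List Char)) : ∀ (f : Nat → List Char),
    rows.foldl
      (fun rot r =>
        (PySem.List.pyRange 0 (w : Int) 1).foldl
          (fun rot j => PySem.List.pySetD rot j
            (PySem.List.pyGetD rot j [] ++ [PySem.List.pyGetD r j ' '])) rot)
      ((List.range w).map f)
    = (List.range w).map (fun j => f j ++ rows.map (fun r => r.getD j ' ')) := by
  induction rows with
  | nil => intro f; simp
  | cons r rest ih =>
    intro f
    rw [List.foldl_cons, inner_loop, ih (fun j => f j ++ [r.getD j ' '])]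
    simp

lemma count_go_singleton (c : Char) : ∀ (fuel : Nat) (s : List Char) (acc : Nat), s.length ≤ fuel →
    PySem.Chars.count.go [c] fuel s acc = acc + s.count c := by
  intro fuel
  induction fuel with
  | zero =>
    intro s acc h
    have : s = [] := List.eq_nil_of_length_eq_zero (by omega)
    subst this
    simp [PySem.Chars.count.go]
  | succ fuel ih =>
    intro s acc h
    cases s with
    | nil => simp [PySem.Chars.count.go]
    | cons x t =>
      rw [PySem.Chars.count.go]
      by_cases hx : x = c
      · subst hx
        simp only [List.isPrefixOf, BEq.rfl, Bool.and_self, if_pos]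
        rw [List.length_cons] at h
        simp only [List.length_cons, List.length_nil, Nat.zero_add, List.drop_one, List.tail_cons]
        rw [ih t (acc + 1) (by omega)]
        rw [List.count_cons_self]
        omega
      · have hpre : ([c].isPrefixOf (x :: t)) = false := by
          simp [List.isPrefixOf]
          exact fun h' => absurd h'.symm hx
        rw [if_neg (by simp [hpre])]
        rw [List.length_cons] at h
        rw [ih t acc (by omega), List.count_cons_of_ne (by exact fun h' => hx (by simpa using h'))]

lemma count_singleton (s : List Char) (c : Char) : PySem.Chars.count s [c] = s.count c := by
  rw [PySem.Chars.count]
  simp only [List.isEmpty_cons, if_neg (by decide : ¬((false : Bool) = true))]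
  rw [count_go_singleton c s.length s 0 le_rfl]
  omega

-- ---------- splitOn '\n' as a structural recursion ----------
def pieces : List Char → List (List Char)
  | [] => [[]]
  | c :: t => if c = '\n' then [] :: pieces t else ((c :: (pieces t).headD []) :: (pieces t).tail)

lemma pieces_ne_nil : ∀ cs, pieces cs ≠ [] := by
  intro cs
  cases cs with
  | nil => simp [pieces]
  | cons c t =>
    simp only [pieces]
    split_ifs <;> simp

lemma pieces_cons_form (cs : List Char) : pieces cs = (pieces cs).headD [] :: (pieces cs).tail := by
  cases h : pieces cs with
  | nil => exact absurd h (pieces_ne_nil cs)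
  | cons a l => simp

lemma splitOn_go_eq : ∀ (l : List Char) (fuel : Nat) (cur : List Char) (acc : List (List Char)),
    l.length < fuel →
    PySem.Chars.splitOn.go ['\n'] fuel l cur acc
    = acc.reverse ++ (cur.reverse ++ (pieces l).headD []) :: (pieces l).tail := by
  intro l
  induction l with
  | nil =>
    intro fuel cur acc h
    cases fuel with
    | zero => omega
    | succ fuel => simp [PySem.Chars.splitOn.go, pieces]
  | cons c t ih =>
    intro fuel cur acc h
    cases fuel with
    | zero => omega
    | succ fuel =>
      by_cases hc : c = '\n'
      · subst hc
        rw [PySem.Chars.splitOn.go]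
        rw [if_pos (by simp [List.isPrefixOf])]
        simp only [List.length_singleton, List.drop_one, List.tail_cons]
        rw [ih fuel [] (cur.reverse :: acc) (by simp at h; omega)]
        have hp : pieces ('\n' :: t) = [] :: pieces t := by simp [pieces]
        rw [hp]
        rw [List.reverse_nil, List.nil_append, ← pieces_cons_form t]
        simp
      · rw [PySem.Chars.splitOn.go]
        rw [if_neg (by simp [List.isPrefixOf]; exact fun h' => absurd h'.symm hc)]
        rw [ih fuel (c :: cur) acc (by simp at h; omega)]
        simp [pieces, hc]

lemma splitOn_eq_pieces (cs : List Char) : PySem.Chars.splitOn cs ['\n'] = pieces cs := by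
  rw [PySem.Chars.splitOn, splitOn_go_eq cs (cs.length + 1) [] [] (by omega)]
  simp only [List.reverse_nil, List.nil_append]
  exact (pieces_cons_form cs).symm

lemma headD_pieces : ∀ cs : List Char, (pieces cs).headD [] = cs.takeWhile (fun c => c != '\n') := by
  intro cs
  induction cs with
  | nil => simp [pieces]
  | cons c t ih =>
    by_cases hc : c = '\n'
    · subst hc; simp [pieces, List.takeWhile]
    · have hb : (c != '\n') = true := by simp [hc]
      simp only [pieces, if_neg hc, List.headD_cons, ih]
      simp [hb]

-- ---------- B's width scans ----------
lemma altWidth_eq_takeWhile : ∀ cs : List Char, altWidth cs = (cs.takeWhile (fun c => c != '\n')).length := by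
  intro cs
  induction cs with
  | nil => simp [altWidth]
  | cons c t ih =>
    by_cases hc : c = '\n'
    · subst hc; simp [altWidth, List.takeWhile]
    · have hb : (c != '\n') = true := by simp [hc]
      simp only [altWidth, if_neg hc, ih]
      simp [hb]

lemma width_eq (cs : List Char)
    (h : (pieces cs).filter (fun x => decide (0 < x.length)) ≠ []) :
    altWidth (altSkipNl cs) = (((pieces cs).filter (fun x => decide (0 < x.length))).headD []).length := by
  induction cs with
  | nil => simp [pieces] at h
  | cons c t ih =>
    by_cases hc : c = '\n'
    · subst hc
      have hp : pieces ('\n' :: t) = [] :: pieces t := by simp [pieces]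
      rw [hp, List.filter_cons] at h ⊢
      rw [if_neg (by simp)] at h ⊢
      simpa [altSkipNl] using ih h
    · have hp : pieces (c :: t) = (c :: (pieces t).headD []) :: (pieces t).tail := by
        simp [pieces, hc]
      rw [hp, List.filter_cons, if_pos (by simp)]
      simp only [List.headD_cons, List.length_cons]
      rw [headD_pieces]
      simp [altSkipNl, hc, altWidth_eq_takeWhile]

-- ---------- B's stream pass, piece by piece ----------
-- one line processed from column c (no newline inside a piece)
def lstep (w : Nat) (st : List Int × Nat) (ch : Char) : List Int × Nat :=
  if st.2 < w ∧ ch = '#' then (st.1.set st.2 (st.1.getD st.2 0 + 1), st.2 + 1) else (st.1, st.2 + 1)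

def runPieces (w : Nat) (ps : List (List Char)) (counts : List Int) : List Int :=
  ps.foldl (fun cnt q => (q.foldl (lstep w) (cnt, 0)).1) counts

lemma stream_pieces (w : Nat) : ∀ (cs : List Char) (st : List Int × Nat),
    (cs.foldl (altStep w) st).1
    = runPieces w (pieces cs).tail ((((pieces cs).headD []).foldl (lstep w) st).1) := by
  intro cs
  induction cs with
  | nil => intro st; simp [pieces, runPieces]
  | cons c t ih =>
    intro st
    by_cases hc : c = '\n'
    · subst hc
      have hp : pieces ('\n' :: t) = [] :: pieces t := by simp [pieces]
      rw [hp, List.foldl_cons]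
      have hstep : altStep w st '\n' = (st.1, 0) := by simp [altStep]
      rw [hstep, ih (st.1, 0)]
      simp only [List.headD_cons, List.tail_cons, List.foldl_nil]
      conv_rhs => rw [pieces_cons_form t]
      simp only [runPieces, List.foldl_cons]
    · have hp : pieces (c :: t) = (c :: (pieces t).headD []) :: (pieces t).tail := by
        simp [pieces, hc]
      rw [hp, List.foldl_cons]
      have hstep : altStep w st c = lstep w st c := by simp [altStep, lstep, hc]
      rw [hstep, ih (lstep w st c)]
      simp only [List.headD_cons, List.tail_cons, List.foldl_cons]

lemma stream_full (w : Nat) (cs : List Char) (x : List Int) :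
    (cs.foldl (altStep w) (x, 0)).1 = runPieces w (pieces cs) x := by
  rw [stream_pieces w cs (x, 0)]
  conv_rhs => rw [pieces_cons_form cs]
  simp only [runPieces, List.foldl_cons]

lemma getD_map_range' {α : Type} (f : Nat → α) (w j : Nat) (d : α) (h : j < w) :
    ((List.range w).map f).getD j d = f j := by
  rw [List.getD_eq_getElem _ _ (by simp [h])]
  simp

lemma lstep_line (w : Nat) : ∀ (p : List Char) (c : Nat) (f : Nat → Int),
    (p.foldl (lstep w) ((List.range w).map f, c)).1
    = (List.range w).map (fun j => f j +
        if c ≤ j ∧ j - c < p.length ∧ p.getD (j - c) ' ' = '#' then 1 else 0) := by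
  intro p
  induction p with
  | nil =>
    intro c f
    simp only [List.foldl_nil]
    apply List.map_congr_left
    intro j _
    simp
  | cons ch p' ih =>
    intro c f
    rw [List.foldl_cons]
    by_cases hcase : c < w ∧ ch = '#'
    · have hstep : lstep w ((List.range w).map f, c) ch
          = (((List.range w).map f).set c (((List.range w).map f).getD c 0 + 1), c + 1) := by
        simp [lstep, hcase]
      rw [hstep, getD_map_range' f w c 0 hcase.1, set_map_range]
      rw [ih (c + 1) _]
      apply List.map_congr_left
      intro j hj
      have hjw : j < w := List.mem_range.mp hj
      by_cases hjc : j = c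
      · subst hjc
        have h1 : ¬ (j + 1 ≤ j) := by omega
        have h2 : j ≤ j ∧ j - j < (ch :: p').length ∧ (ch :: p').getD (j - j) ' ' = '#' := by
          refine ⟨le_rfl, by simp, ?_⟩
          simp [hcase.2]
        simp [h1, hcase.2]
      · rw [if_neg hjc]
        by_cases hle : c + 1 ≤ j
        · have e1 : (j - c) = (j - (c + 1)) + 1 := by omega
          have e2 : (ch :: p').getD (j - c) ' ' = p'.getD (j - (c + 1)) ' ' := by
            rw [e1]; rfl
          have e3 : (j - c < (ch :: p').length) ↔ (j - (c + 1) < p'.length) := by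
            simp only [List.length_cons]; omega
          have e4 : (c ≤ j) := by omega
          by_cases hrest : j - (c + 1) < p'.length ∧ p'.getD (j - (c + 1)) ' ' = '#'
          · rw [if_pos ⟨hle, hrest⟩, if_pos ⟨e4, e3.mpr hrest.1, by rw [e2]; exact hrest.2⟩]
          · rw [if_neg (by tauto), if_neg (by rw [e2] at *; intro hx; exact hrest ⟨e3.mp hx.2.1, hx.2.2⟩)]
        · have h1 : ¬ (c + 1 ≤ j) := hle
          have hcj : ¬ c ≤ j := by omega
          simp [h1, hcj]
    · have hstep : lstep w ((List.range w).map f, c) ch = ((List.range w).map f, c + 1) := by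
        simp only [lstep]
        rw [if_neg hcase]
      rw [hstep, ih (c + 1) f]
      apply List.map_congr_left
      intro j hj
      have hjw : j < w := List.mem_range.mp hj
      by_cases hjc : j = c
      · subst hjc
        have h1 : ¬ (j + 1 ≤ j) := by omega
        have h2 : ¬ (j ≤ j ∧ j - j < (ch :: p').length ∧ (ch :: p').getD (j - j) ' ' = '#') := by
          intro hx
          rw [Nat.sub_self] at hx
          exact hcase ⟨hjw, hx.2.2⟩
        simp [h1]
        exact fun hx => hcase ⟨hjw, hx⟩
      · by_cases hle : c + 1 ≤ j
        · have e1 : (j - c) = (j - (c + 1)) + 1 := by omega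
          have e2 : (ch :: p').getD (j - c) ' ' = p'.getD (j - (c + 1)) ' ' := by
            rw [e1]; rfl
          have e3 : (j - c < (ch :: p').length) ↔ (j - (c + 1) < p'.length) := by
            simp only [List.length_cons]; omega
          have e4 : (c ≤ j) := by omega
          by_cases hrest : j - (c + 1) < p'.length ∧ p'.getD (j - (c + 1)) ' ' = '#'
          · rw [if_pos ⟨hle, hrest⟩, if_pos ⟨e4, e3.mpr hrest.1, by rw [e2]; exact hrest.2⟩]
          · rw [if_neg (by tauto), if_neg (by rw [e2] at *; intro hx; exact hrest ⟨e3.mp hx.2.1, hx.2.2⟩)]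
        · have h1 : ¬ (c + 1 ≤ j) := hle
          have hcj : ¬ c ≤ j := by omega
          simp [h1, hcj]

def pieceHits (j : Nat) (ps : List (List Char)) : Nat :=
  ps.countP (fun p => decide (j < p.length) && (p.getD j ' ' == '#'))

lemma runPieces_map (w : Nat) : ∀ (ps : List (List Char)) (f : Nat → Int),
    runPieces w ps ((List.range w).map f)
    = (List.range w).map (fun j => f j + (pieceHits j ps : Int)) := by
  intro ps
  induction ps with
  | nil =>
    intro f
    simp only [runPieces, List.foldl_nil]
    apply List.map_congr_left
    intro j _
    simp [pieceHits]
  | cons p rest ih =>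
    intro f
    simp only [runPieces, List.foldl_cons] at ih ⊢
    rw [lstep_line w p 0 f, ih]
    apply List.map_congr_left
    intro j hj
    simp only [pieceHits, List.countP_cons, Nat.sub_zero, Nat.zero_le, true_and]
    by_cases hp : j < p.length ∧ p.getD j ' ' = '#'
    · have hbeq : (decide (j < p.length) && (p.getD j ' ' == '#')) = true := by
        simp only [hp.1, decide_true, Bool.true_and, beq_iff_eq]
        exact hp.2
      rw [hbeq, if_pos hp]
      simp only [if_true]
      push_cast
      ring
    · have hbeq : (decide (j < p.length) && (p.getD j ' ' == '#')) = false := by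
        by_cases h1 : j < p.length
        · simp only [h1, decide_true, Bool.true_and, beq_eq_false_iff_ne, ne_eq]
          exact fun h2 => hp ⟨h1, h2⟩
        · simp [h1]
      rw [hbeq, if_neg hp]
      simp only [Bool.false_eq_true, if_false]
      push_cast
      ring

-- ---------- B's right-to-left argmin ----------
def gsuf (key : Nat → Int) (w : Nat) (j : Nat) : Nat :=
  if h : j + 1 < w then
    (if key j ≤ key (gsuf key w (j + 1)) then j else gsuf key w (j + 1))
  else j
termination_by w - j

lemma gsuf_spec (key : Nat → Int) (w : Nat) : ∀ (d j : Nat), w - j = d → j < w →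
    j ≤ gsuf key w j ∧ gsuf key w j < w ∧
    (∀ i, j ≤ i → i < w → key (gsuf key w j) ≤ key i) ∧
    (∀ i, j ≤ i → i < gsuf key w j → key (gsuf key w j) < key i) := by
  intro d
  induction d with
  | zero => intro j h1 h2; omega
  | succ d ih =>
    intro j h1 h2
    rw [gsuf]
    by_cases hj : j + 1 < w
    · obtain ⟨m1, m2, m3, m4⟩ := ih (j + 1) (by omega) hj
      rw [dif_pos hj]
      by_cases hle : key j ≤ key (gsuf key w (j + 1))
      · rw [if_pos hle]
        refine ⟨le_rfl, by omega, ?_, by intro i h1 h2; omega⟩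
        intro i hi1 hi2
        rcases Nat.eq_or_lt_of_le hi1 with h | h
        · subst h
          exact le_rfl
        · exact le_trans hle (m3 i h hi2)
      · rw [if_neg hle]
        refine ⟨by omega, m2, ?_, ?_⟩
        · intro i hi1 hi2
          rcases Nat.eq_or_lt_of_le hi1 with h | h
          · subst h; omega
          · exact m3 i h hi2
        · intro i hi1 hi2
          rcases Nat.eq_or_lt_of_le hi1 with h | h
          · subst h; omega
          · exact m4 i h hi2
    · rw [dif_neg hj]
      refine ⟨le_rfl, by omega, ?_, by intro i h1 h2; omega⟩
      intro i hi1 hi2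
      have : i = j := by omega
      subst this
      exact le_rfl

lemma gsuf_eq_famK (k1 k2 : Nat → Int) (w : Nat) (hw : 0 < w)
    (hk : ∀ j < w, k1 j = k2 j) : gsuf k2 w 0 = famK k1 w := by
  obtain ⟨f1, f2, f3⟩ := famK_spec k1 w hw
  obtain ⟨g0, g1, g2, g3⟩ := gsuf_spec k2 w (w - 0) 0 rfl hw
  set a := famK k1 w
  set b := gsuf k2 w 0
  rcases Nat.lt_trichotomy a b with h | h | h
  · have hba : k2 b < k2 a := g3 a (Nat.zero_le a) h
    have hab : k1 a ≤ k1 b := f2 b g1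
    rw [← hk a f1, ← hk b g1] at hba
    omega
  · exact h.symm
  · have hab : k1 a < k1 b := f3 b h
    have hba : k2 b ≤ k2 a := g2 a (Nat.zero_le a) f1
    rw [← hk a f1, ← hk b g1] at hba
    omega

lemma rev_argmin (key : Nat → Int) (w : Nat) (hw : 0 < w) (counts : List Int)
    (hc : ∀ j < w, PySem.List.pyGetD counts (j : Int) 0 = key j) :
    (PySem.List.pyRange 0 ((w : Int) - 1) 1).reverse.foldl
      (fun best j =>
        if PySem.List.pyGetD counts j 0 ≤ PySem.List.pyGetD counts best 0 then j else best)
      ((w : Int) - 1)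
    = ((gsuf key w 0 : Nat) : Int) := by
  have main : ∀ k, k ≤ w - 1 →
      (List.range k).foldr
        (fun (j : Nat) (best : Int) =>
          if PySem.List.pyGetD counts (j : Int) 0 ≤ PySem.List.pyGetD counts best 0 then (j : Int) else best)
        ((gsuf key w k : Nat) : Int)
      = ((gsuf key w 0 : Nat) : Int) := by
    intro k
    induction k with
    | zero => intro _; rfl
    | succ k ihk =>
      intro hk
      rw [List.range_succ, List.foldr_append, List.foldr_cons, List.foldr_nil]
      have hkw : k + 1 < w := by omega
      have hgk1 : gsuf key w (k + 1) < w := (gsuf_spec key w (w - (k + 1)) (k + 1) rfl hkw).2.1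
      have hgetk : PySem.List.pyGetD counts ((k : Nat) : Int) 0 = key k := hc k (by omega)
      have hgetg : PySem.List.pyGetD counts ((gsuf key w (k + 1) : Nat) : Int) 0 = key (gsuf key w (k + 1)) :=
        hc _ hgk1
      have hstep :
          (if PySem.List.pyGetD counts ((k : Nat) : Int) 0 ≤ PySem.List.pyGetD counts ((gsuf key w (k + 1) : Nat) : Int) 0
           then ((k : Nat) : Int) else ((gsuf key w (k + 1) : Nat) : Int))
          = ((gsuf key w k : Nat) : Int) := by
        rw [hgetk, hgetg]
        conv_rhs => rw [gsuf]
        rw [dif_pos hkw]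
        split_ifs <;> rfl
      rw [hstep]
      exact ihk (by omega)
  have hend : gsuf key w (w - 1) = w - 1 := by
    rw [gsuf, dif_neg (by omega)]
  have hw1 : ((w : Int) - 1) = ((w - 1 : Nat) : Int) := by omega
  rw [hw1, PySem.List.pyRange_zero_natCast, ← List.map_reverse, List.foldl_map, List.foldl_reverse]
  have h0 := main (w - 1) le_rfl
  rw [hend] at h0
  exact h0

-- ===== VERDICT (by name: the statement is the Claim_ definition above) =====
theorem stone_wall_spec : Claim_equal_stone_wall := by
  intro wall _ hpre
  simp only [Pre_stone_wall, splitOn_eq_pieces] at hpre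
  obtain ⟨hne, hlen⟩ := hpre
  simp only [Spec_stone_wall, stone_wall, stone_wall_alt, splitOn_eq_pieces]
  set cs := wall.toList with hcs
  set rows := (pieces cs).filter (fun x => decide (0 < x.length)) with hrows
  set w : Nat := (PySem.List.pyGetD rows 0 []).length with hw
  have hget0 : PySem.List.pyGetD rows 0 [] = rows.headD [] := by
    cases hr : rows with
    | nil => exact absurd hr hne
    | cons a l => simp [PySem.List.pyGetD, PySem.List.pyGet?, PySem.List.pyIdx?]
  have hpos : 0 < w := by
    rw [hw, hget0]
    cases hr : rows with
    | nil => exact absurd hr hne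
    | cons a l =>
      have hmem : a ∈ rows := by rw [hr]; exact List.mem_cons_self
      rw [hrows] at hmem
      have h2 := (List.mem_filter.mp hmem).2
      simpa using h2
  -- ===== A side: nested transposition = first argmin famK =====
  have hrep : (List.replicate w ([] : List Char)) = (List.range w).map (fun _ => []) := by
    simp [List.map_const']
  rw [hrep]
  rw [PySem.List.foldl_pyRange_zero_pyGetD' rows []
    (fun rot r =>
      List.foldl
        (fun rot j => PySem.List.pySetD rot j
          (PySem.List.pyGetD rot j [] ++ [PySem.List.pyGetD r j ' ']))
        rot (PySem.List.pyRange 0 (w : Int)))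
    ((List.range w).map (fun _ => []))]
  rw [outer_loop w rows (fun _ => [])]
  simp only [List.nil_append, List.map_map, Function.comp_def, count_singleton]
  set KEY : Nat → Int := fun j => ((List.count '#' (List.map (fun r => r.getD j ' ') rows) : Nat) : Int) with hKEY
  rw [index_min_eq_famK KEY w hpos]
  -- ===== B side: width, stream counts, right-to-left argmin =====
  have hwB : altWidth (altSkipNl cs) = w := by
    rw [width_eq cs hne, hw, hget0]
  rw [hwB]
  have hrepB : (List.replicate w (0 : Int)) = (List.range w).map (fun _ => (0 : Int)) := by
    simp [List.map_const']
  rw [hrepB, stream_full w cs, runPieces_map w (pieces cs) (fun _ => (0 : Int))]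
  set key2 : Nat → Int := fun j => (pieceHits j (pieces cs) : Int) with hkey2
  have hzero : (List.range w).map (fun j => (0 : Int) + (pieceHits j (pieces cs) : Int))
      = (List.range w).map key2 := by
    apply List.map_congr_left
    intro j _
    simp [hkey2]
  rw [hzero]
  have hc : ∀ j < w, PySem.List.pyGetD ((List.range w).map key2) (j : Int) 0 = key2 j := by
    intro j hj
    rw [PySem.List.pyGetD_natCast]
    exact getD_map_range' key2 w j 0 hj
  rw [rev_argmin key2 w hpos ((List.range w).map key2) hc]
  -- ===== the two argmins agree =====
  have hagree : ∀ j < w, KEY j = key2 j := by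
    intro j hj
    rw [hKEY, hkey2]
    simp only [pieceHits]
    rw [List.count, List.countP_map, hrows, List.countP_filter]
    congr 1
    apply List.countP_congr
    intro p hp
    by_cases h0 : 0 < p.length
    · have hmem : p ∈ rows := by
        rw [hrows]
        exact List.mem_filter.mpr ⟨hp, by simpa using h0⟩
      have hwle : w ≤ p.length := by
        rw [hw, hget0]
        exact hlen p hmem
      have hjlen : j < p.length := by omega
      simp [hjlen, h0]
    · have h0' : p.length = 0 := by omega
      simp [h0']
  rw [gsuf_eq_famK KEY key2 w hpos hagree]
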